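-- pv_equiv track=rewrite | github.com/curltonkeyboards/vial-gui-custom | src/main/python/editor/keymap_presets.py | _fill_grid_continuous
-- ===== SOURCE A (Python) =====
-- CHROMATIC_NAMES = ['C', 'Cs', 'D', 'Ds', 'E', 'F', 'Fs', 'G', 'Gs', 'A', 'As', 'B']
--
-- COLS = 14
--
-- def note_to_keycode(note_index, zone="base"):
--     """Convert 0-71 note index to MI_* keycode string.
--
--     Note indices: 0=C0, 1=C#0, ..., 11=B0, 12=C1, ..., 71=B5.
--     zone: "base" for MI_*, "ks" for MI_SPLIT_*, "ts" for MI_SPLIT2_*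
--     Returns KC_NO if out of the valid 0-71 range.
--     """
--     if note_index < 0 or note_index > 71:
--         return "KC_NO"
--     octave = note_index // 12
--     note = note_index % 12
--     name = CHROMATIC_NAMES[note]
--     if zone == "ks":
--         prefix = "MI_SPLIT_"
--     elif zone == "ts":
--         prefix = "MI_SPLIT2_"
--     else:
--         prefix = "MI_"
--     if octave == 0:
--         return "{}{}".format(prefix, name)
--     return "{}{}_{}".format(prefix, name, octave)
--
-- def _make_grid(num_rows):
--     """Create a num_rows x 14 grid filled with KC_NO."""
--     return [["KC_NO"] * COLS for _ in range(num_rows)]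
--
-- def _fill_grid_continuous(notes, num_rows):
--     """Fill grid bottom-to-top, left-to-right with given note indices."""
--     grid = _make_grid(num_rows)
--     idx = 0
--     for row in range(num_rows - 1, -1, -1):  # bottom to top
--         for col in range(COLS):
--             if idx < len(notes):
--                 grid[row][col] = note_to_keycode(notes[idx])
--                 idx += 1
--     return grid
-- ===== SOURCE B (Python) =====
-- CHROMATIC_NAMES = ['C', 'Cs', 'D', 'Ds', 'E', 'F', 'Fs', 'G', 'Gs', 'A', 'As', 'B']
--
-- COLS = 14
--
-- def note_to_keycode(note_index, zone="base"):
--     if note_index < 0 or note_index > 71: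
--         return "KC_NO"
--     octave = note_index // 12
--     note = note_index % 12
--     name = CHROMATIC_NAMES[note]
--     if zone == "ks":
--         prefix = "MI_SPLIT_"
--     elif zone == "ts":
--         prefix = "MI_SPLIT2_"
--     else:
--         prefix = "MI_"
--     if octave == 0:
--         return "{}{}".format(prefix, name)
--     return "{}{}_{}".format(prefix, name, octave)
--
-- def _fill_grid_continuous(notes, num_rows):
--     """Pad the keycodes to a full grid's worth, chunk into rows, reverse."""
--     if num_rows <= 0:
--         return []
--     total = num_rows * COLS
--     cells = [note_to_keycode(n) for n in notes[:total]]
--     cells += ["KC_NO"] * (total - len(cells))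
--     return [cells[r * COLS:(r + 1) * COLS] for r in range(num_rows)][::-1]
-- ===== Notes on version B (the rewrite author's own statement) =====
-- stated objective: simpler
-- what changed: A scans every grid cell bottom-to-top with a nested loop and a running note counter; B maps the truncated notes to keycodes once, pads the flat list to a full grid, chunks it into rows of 14 and reverses the row list.
import Mathlib
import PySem

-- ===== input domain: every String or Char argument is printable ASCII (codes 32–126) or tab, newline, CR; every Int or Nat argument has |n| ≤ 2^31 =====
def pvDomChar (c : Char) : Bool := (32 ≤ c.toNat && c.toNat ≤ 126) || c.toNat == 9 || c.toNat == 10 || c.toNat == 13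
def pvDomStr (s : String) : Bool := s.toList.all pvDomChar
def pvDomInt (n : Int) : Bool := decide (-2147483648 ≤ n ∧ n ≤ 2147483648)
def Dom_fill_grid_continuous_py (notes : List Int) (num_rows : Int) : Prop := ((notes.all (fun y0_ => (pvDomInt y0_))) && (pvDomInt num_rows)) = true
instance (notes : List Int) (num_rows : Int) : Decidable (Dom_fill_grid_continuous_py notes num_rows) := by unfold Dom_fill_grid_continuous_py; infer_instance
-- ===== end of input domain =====

-- B replaces A's nested bottom-to-top cell scan with a running counter by a single chunking pass:
-- map the (truncated) notes to keycodes, pad to a full grid, chunk into rows of 14 and reverse (objective: simpler).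

-- ===== PORT A =====
-- shared module helper: note_to_keycode (identical in both Pythons)
def pvCHROMATIC : List String := ["C", "Cs", "D", "Ds", "E", "F", "Fs", "G", "Gs", "A", "As", "B"]

def note_to_keycode_py (note_index : Int) (zone : String) : String :=
  if note_index < 0 || note_index > 71 then "KC_NO"
  else
    let octave := PySem.Int.floordiv note_index 12
    let note := PySem.Int.mod note_index 12
    -- CHROMATIC_NAMES[note]: 0 ≤ note < 12 here, so the index is always in range and the default unreachable
    let name := PySem.List.pyGetD pvCHROMATIC note ""
    let pfx := if zone == "ks" then "MI_SPLIT_" else if zone == "ts" then "MI_SPLIT2_" else "MI_"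
    -- "{}{}".format / "{}{}_{}".format on these ASCII pieces: exact string concatenation
    if octave = 0 then pfx ++ name
    else pfx ++ name ++ "_" ++ PySem.Int.toStr octave

def pv_make_grid (num_rows : Int) : List (List String) :=
  (PySem.List.pyRange 0 num_rows 1).map (fun _ => PySem.List.pyRepeat ["KC_NO"] 14)

-- grid[row][col] = v / grid[row]: every index the ports reach satisfies 0 ≤ i < len, where .toNat / the default are exact
def pvSetAt {α : Type} (xs : List α) (i : Int) (v : α) : List α := xs.set i.toNat v

-- the body of A's inner 'for col' loop (state = (grid, idx))
def pvInnerF (notes : List Int) (row : Int) (st : List (List String) × Int) (col : Int) :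
    List (List String) × Int :=
  if st.2 < (notes.length : Int) then
    (pvSetAt st.1 row (pvSetAt (PySem.List.pyGetD st.1 row [])
        col (note_to_keycode_py (PySem.List.pyGetD notes st.2 0) "base")), st.2 + 1)
  else st

def fill_grid_continuous_py (notes : List Int) (num_rows : Int) : List (List String) :=
  let grid := pv_make_grid num_rows
  let res := (PySem.List.pyRange (num_rows - 1) (-1) (-1)).foldl
    (fun st row => (PySem.List.pyRange 0 14 1).foldl (pvInnerF notes row) st)
    (grid, (0 : Int))
  res.1

-- ===== PORT B =====
def fill_grid_continuous_py_alt (notes : List Int) (num_rows : Int) : List (List String) :=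
  if num_rows ≤ 0 then []
  else
    let total := num_rows * 14
    let cells := (PySem.List.slice notes none (some total)).map (fun n => note_to_keycode_py n "base")
    let cells2 := cells ++ PySem.List.pyRepeat ["KC_NO"] (total - (cells.length : Int))
    -- [::-1] on a list is exact reversal
    ((PySem.List.pyRange 0 num_rows 1).map (fun r =>
        PySem.List.slice cells2 (some (r * 14)) (some ((r + 1) * 14)))).reverse

-- ===== PRECONDITION & SPEC =====
def Spec_fill_grid_continuous_py (notes : List Int) (num_rows : Int) (out : List (List String)) : Prop := out = fill_grid_continuous_py_alt notes num_rows
instance (notes : List Int) (num_rows : Int) (out : List (List String)) : Decidable (Spec_fill_grid_continuous_py notes num_rows out) := by unfold Spec_fill_grid_continuous_py; infer_instance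

-- ===== CLAIM (what is proved, stated in full; the proofs are below) =====
def Claim_equal_fill_grid_continuous_py : Prop := ∀ (notes : List Int) (num_rows : Int), Dom_fill_grid_continuous_py notes num_rows → Spec_fill_grid_continuous_py notes num_rows (fill_grid_continuous_py notes num_rows)

-- ===== LEMMAS AND PROOFS =====

-- proof-side abbreviation for the keycode of one note
def kcB (n : Int) : String := note_to_keycode_py n "base"

-- the row that ends up holding chunk j (chunks counted from the bottom row)
def rowOf (notes : List Int) (j : Nat) : List String :=
  (List.range 14).map (fun c =>
    if 14 * j + c < notes.length then kcB (notes.getD (14 * j + c) 0) else "KC_NO")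

-- the common normal form of both ports
def normGrid (notes : List Int) (N : Nat) : List (List String) :=
  (List.range N).map (fun r => rowOf notes (N - 1 - r))

-- the worked row after A's inner loop has processed columns 0..k-1 starting at note offset i
def rowPart (notes : List Int) (i k : Nat) : List String :=
  (List.range 14).map (fun c =>
    if c < k ∧ i + c < notes.length then kcB (notes.getD (i + c) 0) else "KC_NO")

-- the grid after A's outer loop has processed its first m rows (the bottom m rows)
def gridAfter (notes : List Int) (N m : Nat) : List (List String) :=
  (List.range N).map (fun r =>
    if N - m ≤ r then rowOf notes (N - 1 - r) else List.replicate 14 "KC_NO")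

lemma pyRange_down (n : Int) :
    PySem.List.pyRange (n - 1) (-1) (-1) = (List.range n.toNat).map (fun k : Nat => n - 1 - (k : Int)) := by
  simp only [PySem.List.pyRange]
  rw [if_neg (show ¬((-1:Int) = 0) by norm_num), if_neg (show ¬((0:Int) < -1) by norm_num)]
  split_ifs with h
  · rw [show (n - 1 - -1 + - -1 - 1) / - -1 = n by norm_num]
    refine List.map_congr_left ?_
    intro k _
    ring
  · have : n.toNat = 0 := by omega
    simp [this]

lemma pyRange_cols : PySem.List.pyRange 0 14 1 = (List.range 14).map (fun c : Nat => (c : Int)) := by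
  decide

lemma rowPart_set (notes : List Int) (i k : Nat) (h : i + k < notes.length) :
    (rowPart notes i k).set k (kcB (notes.getD (i + k) 0)) = rowPart notes i (k + 1) := by
  unfold rowPart
  refine List.ext_getElem (by simp) ?_
  intro p h1 h2
  simp only [List.getElem_set, List.getElem_map, List.getElem_range]
  split_ifs with e e1 e2 e2 <;> first | (subst e; rfl) | rfl | omega

lemma rowPart_stall (notes : List Int) (i k : Nat) (h : ¬ i + k < notes.length) :
    rowPart notes i k = rowPart notes i (k + 1) := by
  unfold rowPart
  refine List.map_congr_left ?_
  intro c hc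
  simp only [List.mem_range] at hc
  by_cases hck : c < k ∧ i + c < notes.length
  · rw [if_pos hck, if_pos ⟨by omega, hck.2⟩]
  · rw [if_neg hck, if_neg (by omega)]

lemma rowPart_min (notes : List Int) (j : Nat) :
    rowPart notes (min notes.length (14 * j)) 14 = rowOf notes j := by
  unfold rowPart rowOf
  refine List.map_congr_left ?_
  intro c hc
  simp only [List.mem_range] at hc
  by_cases h : 14 * j + c < notes.length
  · rw [if_pos (by omega), if_pos h]
    congr 2
    omega
  · rw [if_neg (by omega), if_neg h]

lemma inner_eval (notes : List Int) (g : List (List String)) (r i k : Nat)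
    (hr : r < g.length) (hrow : g.getD r [] = List.replicate 14 "KC_NO")
    (hi : i ≤ notes.length) (hk : k ≤ 14) :
    ((List.range k).map (fun c : Nat => (c : Int))).foldl (pvInnerF notes (r : Int)) (g, (i : Int))
      = (g.set r (rowPart notes i k), ((min notes.length (i + k) : Nat) : Int)) := by
  induction k with
  | zero =>
    simp only [List.range_zero, List.map_nil, List.foldl_nil]
    have hrp : rowPart notes i 0 = List.replicate 14 "KC_NO" := by
      unfold rowPart
      refine List.ext_getElem (by simp) ?_
      intro p h1 h2
      simp
    rw [hrp, ← hrow, List.getD_eq_getElem _ _ hr, List.set_getElem_self]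
    congr 1
    omega
  | succ k ih =>
    rw [List.range_succ (n := k), List.map_append, List.foldl_append, ih (by omega)]
    simp only [List.map_cons, List.map_nil, List.foldl_cons, List.foldl_nil, pvInnerF]
    by_cases h : i + k < notes.length
    · rw [if_pos (by push_cast; omega)]
      have hmin : min notes.length (i + k) = i + k := by omega
      rw [hmin]
      have hget : PySem.List.pyGetD (g.set r (rowPart notes i k)) (r : Int) []
          = rowPart notes i k := by
        rw [PySem.List.pyGetD_natCast, List.getD_eq_getElem _ _ (by simpa using hr),
          List.getElem_set_self]
      rw [hget, PySem.List.pyGetD_natCast]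
      simp only [pvSetAt, Int.toNat_natCast]
      rw [List.set_set, show note_to_keycode_py (notes.getD (i + k) 0) "base" = kcB (notes.getD (i + k) 0) from rfl,
        rowPart_set notes i k h]
      · congr 1
        push_cast
        omega
    · rw [if_neg (by push_cast; omega)]
      rw [rowPart_stall notes i k h]
      congr 1
      omega

lemma outer_eval (notes : List Int) (N m : Nat) (hm : m ≤ N) :
    ((List.range m).map (fun k : Nat => ((N - 1 - k : Nat) : Int))).foldl
        (fun st row => ((List.range 14).map (fun c : Nat => (c : Int))).foldl (pvInnerF notes row) st)
        ((List.range N).map (fun _ => List.replicate 14 "KC_NO"), (0 : Int))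
      = (gridAfter notes N m, ((min notes.length (14 * m) : Nat) : Int)) := by
  induction m with
  | zero =>
    simp only [List.range_zero, List.map_nil, List.foldl_nil]
    congr 1
    · unfold gridAfter
      refine List.map_congr_left ?_
      intro r hr
      simp only [List.mem_range] at hr
      rw [if_neg (by omega)]
    · simp
  | succ m ih =>
    rw [List.range_succ (n := m), List.map_append, List.foldl_append, ih (by omega)]
    simp only [List.map_cons, List.map_nil, List.foldl_cons, List.foldl_nil]
    have hr : N - 1 - m < (gridAfter notes N m).length := by
      unfold gridAfter; simp; omega
    have hrow : (gridAfter notes N m).getD (N - 1 - m) [] = List.replicate 14 "KC_NO" := by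
      rw [List.getD_eq_getElem _ _ hr]
      unfold gridAfter
      simp only [List.getElem_map, List.getElem_range]
      rw [if_neg (by omega)]
    rw [inner_eval notes (gridAfter notes N m) (N - 1 - m) (min notes.length (14 * m)) 14
      hr hrow (by omega) (by omega)]
    congr 1
    · rw [rowPart_min]
      unfold gridAfter
      refine List.ext_getElem (by simp) ?_
      intro p h1 h2
      simp only [List.getElem_set, List.getElem_map, List.getElem_range]
      by_cases hp : N - 1 - m = p
      · rw [if_pos hp, if_pos (by omega)]
        congr 1
        omega
      · rw [if_neg hp]
        by_cases h3 : N - m ≤ p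
        · rw [if_pos (by omega), if_pos (by omega)]
        · rw [if_neg (by omega), if_neg (by omega)]
    · congr 1
      omega

lemma make_grid_pos (num_rows : Int) (h : 0 < num_rows) :
    pv_make_grid num_rows = (List.range num_rows.toNat).map (fun _ => List.replicate 14 "KC_NO") := by
  unfold pv_make_grid
  rw [show num_rows = ((num_rows.toNat : Nat) : Int) by omega, PySem.List.pyRange_zero_natCast,
    List.map_map]
  refine List.map_congr_left ?_
  intro k _
  rw [PySem.List.pyRepeat_singleton]
  rfl

lemma portA_norm (notes : List Int) (num_rows : Int) :
    fill_grid_continuous_py notes num_rows = normGrid notes num_rows.toNat := by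
  unfold fill_grid_continuous_py
  simp only []
  by_cases h : num_rows ≤ 0
  · rw [pyRange_down, show num_rows.toNat = 0 by omega]
    simp only [List.range_zero, List.map_nil, List.foldl_nil]
    unfold pv_make_grid normGrid
    simp only [List.range_zero, List.map_nil]
    rw [show PySem.List.pyRange 0 num_rows 1 = [] by
      simp only [PySem.List.pyRange]
      rw [if_neg (show ¬((1:Int) = 0) by norm_num), if_pos (show (0:Int) < 1 by norm_num),
        if_neg (show ¬((0:Int) < num_rows) by omega)]
      simp]
    simp
  · have hN : num_rows = ((num_rows.toNat : Nat) : Int) := by omega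
    rw [pyRange_down, pyRange_cols, make_grid_pos num_rows (by omega)]
    rw [List.map_congr_left (l := List.range num_rows.toNat)
      (f := fun k : Nat => num_rows - 1 - (k : Int))
      (g := fun k : Nat => ((num_rows.toNat - 1 - k : Nat) : Int))
      (fun k hk => by
        simp only [List.mem_range] at hk
        show num_rows - 1 - (k : Int) = ((num_rows.toNat - 1 - k : Nat) : Int)
        omega)]
    rw [outer_eval notes num_rows.toNat num_rows.toNat le_rfl]
    unfold gridAfter normGrid
    refine List.map_congr_left ?_
    intro r hr
    simp only [List.mem_range] at hr
    rw [if_pos (by omega)]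

lemma cells2_getElem (notes : List Int) (T : Nat) (p : Nat) (hp : p < T)
    (hlen : ((notes.take T).map kcB
        ++ List.replicate (T - ((notes.take T).map kcB).length) "KC_NO").length = T) :
    ((notes.take T).map kcB ++ List.replicate (T - ((notes.take T).map kcB).length) "KC_NO")[p]'(by omega)
      = if p < notes.length then kcB (notes.getD p 0) else "KC_NO" := by
  by_cases h : p < ((notes.take T).map kcB).length
  · rw [List.getElem_append_left h]
    have hpl : p < notes.length := by
      simp only [List.length_map, List.length_take] at h
      omega
    rw [if_pos hpl]
    simp only [List.getElem_map, List.getElem_take]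
    rw [List.getD_eq_getElem _ _ hpl]
  · rw [List.getElem_append_right (by omega), List.getElem_replicate]
    have : ¬ p < notes.length := by
      simp only [List.length_map, List.length_take] at h
      omega
    rw [if_neg this]

lemma portB_norm (notes : List Int) (num_rows : Int) :
    fill_grid_continuous_py_alt notes num_rows = normGrid notes num_rows.toNat := by
  unfold fill_grid_continuous_py_alt
  simp only []
  by_cases h : num_rows ≤ 0
  · rw [if_pos h, show num_rows.toNat = 0 by omega]
    unfold normGrid
    simp
  · rw [if_neg h]
    have hN : num_rows = ((num_rows.toNat : Nat) : Int) := by omega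
    set N := num_rows.toNat with hNdef
    have hcells : (PySem.List.slice notes none (some (num_rows * 14))).map (fun n => note_to_keycode_py n "base")
        = (notes.take (N * 14)).map kcB := by
      rw [PySem.List.slice_to notes (by omega), show (num_rows * 14).toNat = N * 14 by omega]
      rfl
    rw [hcells, PySem.List.pyRepeat_singleton, hN, PySem.List.pyRange_zero_natCast, List.map_map]
    set cellsM := (notes.take (N * 14)).map kcB with hcM
    have hlenM : cellsM.length = min (N * 14) notes.length := by
      simp [hcM]
    have hpad : (((N : Int) * 14) - (cellsM.length : Int)).toNat = N * 14 - cellsM.length := by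
      omega
    rw [hpad]
    set cells2 := cellsM ++ List.replicate (N * 14 - cellsM.length) "KC_NO" with hc2
    have hlen2 : cells2.length = N * 14 := by
      simp [hc2]
      omega
    have hchunk : ∀ k : Nat, k < N →
        PySem.List.slice cells2 (some ((k : Int) * 14)) (some (((k : Int) + 1) * 14))
          = rowOf notes k := by
      intro k hk
      rw [show ((k : Int) * 14) = ((k * 14 : Nat) : Int) by push_cast; ring,
        show (((k : Int) + 1) * 14) = (((k + 1) * 14 : Nat) : Int) by push_cast; ring,
        PySem.List.slice_natCast]
      unfold rowOf
      refine List.ext_getElem ?_ ?_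
      · simp only [List.length_take, List.length_drop, List.length_map, List.length_range, hlen2]
        omega
      · intro p h1 h2
        have hp14 : p < 14 := by
          simp only [List.length_map, List.length_range] at h2
          omega
        rw [List.getElem_take, List.getElem_drop]
        simp only [List.getElem_map, List.getElem_range]
        have hlt : k * 14 + p < N * 14 := by omega
        have hg := cells2_getElem notes (N * 14) (k * 14 + p) hlt hlen2
        rw [show 14 * k + p = k * 14 + p by ring]
        exact hg
    simp only [Function.comp_def]
    rw [List.map_congr_left (l := List.range N)
      (f := fun k : Nat => PySem.List.slice cells2 (some ((k : Int) * 14)) (some (((k : Int) + 1) * 14)))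
      (g := fun k : Nat => rowOf notes k)
      (fun k hk => by simp only [List.mem_range] at hk; exact hchunk k hk)]
    unfold normGrid
    refine List.ext_getElem (by simp) ?_
    intro p h1 h2
    rw [List.getElem_reverse]
    simp only [List.getElem_map, List.getElem_range, List.length_map, List.length_range] at *

-- ===== VERDICT (by name: the statement is the Claim_ definition above) =====
theorem fill_grid_continuous_py_spec : Claim_equal_fill_grid_continuous_py := by
  intro notes num_rows _
  unfold Spec_fill_grid_continuous_py
  rw [portA_norm, portB_norm]
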